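-- pv_equiv track=rewrite | github.com/rewirepy/rewire | rewire/config.py | update_path
-- ===== SOURCE A (Python) =====
-- def update_path(config_path: str, post_path: str):
--     level = 0
--
--     while post_path.startswith("."):
--         level -= 1
--         post_path = post_path[1:]
--
--     if level == 0:
--         return post_path
--
--     for _ in range(1, -level):
--         config_path = ".".join(config_path.split(".")[:-1])
--
--     if post_path:
--         config_path = f"{config_path}.{post_path}".strip(".")
--     return config_path
-- ===== SOURCE B (Python) =====
-- def update_path(config_path: str, post_path: str):
--     stripped = post_path.lstrip(".")
--     d = len(post_path) - len(stripped)
--     if d == 0: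
--         return stripped
--     if d > 1:
--         config_path = ".".join(config_path.split(".")[:-(d - 1)])
--     if stripped:
--         config_path = f"{config_path}.{stripped}".strip(".")
--     return config_path
-- ===== Notes on version B (the rewrite author's own statement) =====
-- stated objective: simpler
-- what changed: Replaces A's character-by-character while loop and its per-level for loop (each iteration re-splitting and re-joining config_path to drop one segment) with lstrip('.') plus a single split/slice/join that trims the last d-1 segments in one operation.
import Mathlib
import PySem

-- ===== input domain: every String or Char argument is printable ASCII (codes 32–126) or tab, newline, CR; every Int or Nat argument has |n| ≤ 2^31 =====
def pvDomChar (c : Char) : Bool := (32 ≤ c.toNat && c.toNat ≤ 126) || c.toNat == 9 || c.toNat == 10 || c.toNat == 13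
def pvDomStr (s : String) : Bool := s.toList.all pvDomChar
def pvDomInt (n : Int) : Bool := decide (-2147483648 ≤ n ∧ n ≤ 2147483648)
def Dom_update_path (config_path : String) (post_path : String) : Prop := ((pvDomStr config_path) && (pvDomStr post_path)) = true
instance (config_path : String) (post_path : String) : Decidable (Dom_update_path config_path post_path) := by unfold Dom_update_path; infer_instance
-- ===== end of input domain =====

-- B replaces A's two loops (dot-stripping while loop and per-level drop-last-segment for loop)
-- by lstrip + one split/slice/join; objective: simpler (single pass over the segment list).

-- ===== PORT A =====
-- while post_path.startswith("."): level -= 1; post_path = post_path[1:]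
-- (startswith "." on a nonempty string tests its first character; [1:] is its tail)
def update_path_dots (level : Int) (post : List Char) : Int × List Char :=
  match post with
  | c :: rest => if c = '.' then update_path_dots (level - 1) rest else (level, c :: rest)
  | [] => (level, [])

-- one body of the for loop: config_path = ".".join(config_path.split(".")[:-1])
def update_path_dropSeg (cfg : List Char) : List Char :=
  PySem.Chars.join ['.'] (PySem.List.slice (PySem.Chars.splitOn cfg ['.']) none (some (-1)))

def update_path (config_path : String) (post_path : String) : String :=
  match update_path_dots 0 post_path.toList with
  | (level, post) =>
    if level = 0 then String.mk post
    else
      let cfg := (PySem.List.pyRange 1 (-level) 1).foldl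
        (fun cp _ => update_path_dropSeg cp) config_path.toList
      let cfg := if post ≠ [] then PySem.Chars.stripChars (cfg ++ '.' :: post) ['.'] else cfg
      String.mk cfg

-- ===== PORT B =====
def update_path_alt (config_path : String) (post_path : String) : String :=
  let stripped := post_path.toList.dropWhile (· == '.')   -- post_path.lstrip("."), exact
  let d := post_path.toList.length - stripped.length      -- number of leading dots removed
  if d = 0 then String.mk stripped
  else
    -- d > 1: ".".join(config_path.split(".")[:-(d - 1)]); d == 1: unchanged
    let cfg := if d > 1 then
        PySem.Chars.join ['.']
          (PySem.List.slice (PySem.Chars.splitOn config_path.toList ['.']) none (some (-(d : Int) + 1)))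
      else config_path.toList
    let cfg := if stripped ≠ [] then PySem.Chars.stripChars (cfg ++ '.' :: stripped) ['.'] else cfg
    String.mk cfg

-- ===== PRECONDITION & SPEC =====
def Spec_update_path (config_path : String) (post_path : String) (out : String) : Prop := out = update_path_alt config_path post_path
instance (config_path : String) (post_path : String) (out : String) : Decidable (Spec_update_path config_path post_path out) := by unfold Spec_update_path; infer_instance

-- ===== CLAIM (what is proved, stated in full; the proofs are below) =====
def Claim_equal_update_path : Prop := ∀ (config_path : String) (post_path : String), Dom_update_path config_path post_path → Spec_update_path config_path post_path (update_path config_path post_path)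

-- ===== LEMMAS AND PROOFS =====

-- clean structural model of splitOn with separator "."
def dsAux : List Char → List Char → List (List Char)
  | [], cur => [cur.reverse]
  | c :: rest, cur => if c = '.' then cur.reverse :: dsAux rest [] else dsAux rest (c :: cur)

theorem go_eq_dsAux : ∀ (fuel : Nat) (l cur : List Char) (acc : List (List Char)), l.length ≤ fuel →
    PySem.Chars.splitOn.go ['.'] fuel l cur acc = acc.reverse ++ dsAux l cur := by
  intro fuel
  induction fuel with
  | zero =>
    intro l cur acc h
    have : l = [] := List.length_eq_zero_iff.mp (Nat.le_zero.mp h)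
    subst this
    rw [PySem.Chars.splitOn.go.eq_def]
    simp [dsAux]
  | succ n ih =>
    intro l cur acc h
    match l with
    | [] =>
      rw [PySem.Chars.splitOn.go.eq_def]
      simp [dsAux]
    | c :: rest =>
      by_cases hc : c = '.'
      · subst hc
        have hpre : ['.'].isPrefixOf ('.' :: rest) = true := by simp [List.isPrefixOf]
        rw [PySem.Chars.splitOn.go.eq_def]
        simp only [hpre, if_pos]
        rw [ih _ _ _ (by simpa using Nat.le_of_succ_le_succ h)]
        simp [dsAux]
      · have hpre : ['.'].isPrefixOf (c :: rest) = false := by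
          simp [List.isPrefixOf]
          exact fun h' => absurd h'.symm hc
        rw [PySem.Chars.splitOn.go.eq_def]
        simp only [hpre]
        rw [if_neg (by simp)]
        rw [ih _ _ _ (Nat.le_of_succ_le_succ h)]
        simp [dsAux, hc]

theorem splitOn_dot (cs : List Char) : PySem.Chars.splitOn cs ['.'] = dsAux cs [] := by
  unfold PySem.Chars.splitOn
  rw [go_eq_dsAux _ _ _ _ (by omega)]
  simp

theorem dsAux_ne_nil : ∀ (l cur : List Char), dsAux l cur ≠ [] := by
  intro l
  induction l with
  | nil => intro cur; simp [dsAux]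
  | cons c rest ih =>
    intro cur
    by_cases hc : c = '.'
    · simp [dsAux, hc]
    · simpa [dsAux, hc] using ih (c :: cur)

theorem intercalate_cons_cons (x y : List Char) (t : List (List Char)) :
    ['.'].intercalate (x :: y :: t) = x ++ '.' :: ['.'].intercalate (y :: t) := by
  simp [List.intercalate]

theorem join_dsAux : ∀ (l cur : List Char),
    PySem.Chars.join ['.'] (dsAux l cur) = cur.reverse ++ l := by
  intro l
  induction l with
  | nil => intro cur; simp [dsAux, PySem.Chars.join, List.intercalate]
  | cons c rest ih =>
    intro cur
    by_cases hc : c = '.'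
    · subst hc
      rw [show dsAux ('.' :: rest) cur = cur.reverse :: dsAux rest [] from by simp [dsAux]]
      obtain ⟨y, t, hyt⟩ := List.exists_cons_of_ne_nil (dsAux_ne_nil rest [])
      have h2 := ih []
      rw [hyt] at h2 ⊢
      simp only [PySem.Chars.join] at h2 ⊢
      rw [intercalate_cons_cons]
      simp at h2
      rw [h2]
    · rw [show dsAux (c :: rest) cur = dsAux rest (c :: cur) from by simp [dsAux, hc]]
      rw [ih (c :: cur)]
      simp

theorem dsAux_nodot : ∀ (l cur : List Char), '.' ∉ cur →
    ∀ p ∈ dsAux l cur, '.' ∉ p := by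
  intro l
  induction l with
  | nil =>
    intro cur hcur p hp
    simp [dsAux] at hp
    subst hp
    simpa using hcur
  | cons c rest ih =>
    intro cur hcur p hp
    by_cases hc : c = '.'
    · subst hc
      rw [show dsAux ('.' :: rest) cur = cur.reverse :: dsAux rest [] from by simp [dsAux]] at hp
      rcases List.mem_cons.mp hp with hp | hp
      · subst hp; simpa using hcur
      · exact ih [] (by simp) p hp
    · rw [show dsAux (c :: rest) cur = dsAux rest (c :: cur) from by simp [dsAux, hc]] at hp
      refine ih (c :: cur) ?_ p hp
      intro h
      rcases List.mem_cons.mp h with h | h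
      · exact hc h.symm
      · exact hcur h

theorem dsAux_append (a : List Char) : ∀ (x cur : List Char), '.' ∉ a →
    dsAux (a ++ x) cur = dsAux x (a.reverse ++ cur) := by
  induction a with
  | nil => intro x cur _; simp
  | cons c rest ih =>
    intro x cur ha
    have hc : c ≠ '.' := by intro h; exact ha (by simp [h])
    simp only [List.cons_append, dsAux, if_neg hc]
    rw [ih x (c :: cur) (by intro h; exact ha (by simp [h]))]
    simp

theorem dsAux_intercalate : ∀ (l : List (List Char)), l ≠ [] → (∀ p ∈ l, '.' ∉ p) →
    dsAux (['.'].intercalate l) [] = l := by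
  intro l
  induction l with
  | nil => intro h; exact absurd rfl h
  | cons a t ih =>
    intro _ hnd
    match t with
    | [] =>
      have h1 : ['.'].intercalate [a] = a := by simp [List.intercalate]
      rw [h1]
      conv_lhs => rw [← List.append_nil a]
      rw [dsAux_append a [] [] (hnd a (by simp))]
      simp [dsAux]
    | b :: t' =>
      rw [intercalate_cons_cons]
      rw [dsAux_append a ('.' :: ['.'].intercalate (b :: t')) [] (hnd a (by simp))]
      rw [show ∀ cur, dsAux ('.' :: ['.'].intercalate (b :: t')) cur
            = cur.reverse :: dsAux (['.'].intercalate (b :: t')) [] from fun cur => by simp [dsAux]]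
      rw [ih (by simp) (fun p hp => hnd p (by simp [hp]))]
      simp

-- slice xs[:-k] (k ≥ 1) is take (len - k)
theorem slice_neg {α : Type} (l : List α) (k : Nat) (hk : 1 ≤ k) :
    PySem.List.slice l none (some (-(k : Int))) = l.take (l.length - k) := by
  simp only [PySem.List.slice, PySem.List.clampIdx]
  have h1 : (-(k : Int) < 0) := by omega
  rw [if_pos h1]
  by_cases h2 : (l.length : Int) + -(k : Int) < 0
  · rw [if_pos h2]
    simp only [List.drop_zero]
    have : l.length - k = 0 := by omega
    simp [this]
  · rw [if_neg h2]
    simp only [List.drop_zero]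
    congr 1
    omega

-- one drop step, on the clean model
theorem dropSeg_eq (cs : List Char) :
    update_path_dropSeg cs = PySem.Chars.join ['.'] ((dsAux cs []).dropLast) := by
  unfold update_path_dropSeg
  rw [splitOn_dot]
  congr 1
  rw [show ((-1 : Int)) = -((1 : Nat) : Int) by norm_num,
    slice_neg _ 1 (le_refl 1), ← List.dropLast_eq_take]

theorem dropSeg_nil : update_path_dropSeg [] = [] := by
  rw [dropSeg_eq]
  simp [dsAux, PySem.Chars.join, List.intercalate]

theorem iterate_dropSeg_nil : ∀ k : Nat, update_path_dropSeg^[k] [] = [] := by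
  intro k
  induction k with
  | zero => simp
  | succ n ih => rw [Function.iterate_succ_apply, dropSeg_nil, ih]

theorem key_iterate : ∀ (k : Nat) (l : List (List Char)), l ≠ [] → (∀ p ∈ l, '.' ∉ p) →
    update_path_dropSeg^[k] (['.'].intercalate l) = ['.'].intercalate (l.take (l.length - k)) := by
  intro k
  induction k with
  | zero => intro l _ _; simp
  | succ n ih =>
    intro l hne hnd
    rw [Function.iterate_succ_apply]
    have hstep : update_path_dropSeg (['.'].intercalate l) = ['.'].intercalate l.dropLast := by
      rw [dropSeg_eq, dsAux_intercalate l hne hnd]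
      rfl
    rw [hstep]
    by_cases hdl : l.dropLast = []
    · rw [hdl]
      have hlen : l.length = 1 := by
        have h := congrArg List.length hdl
        simp at h
        rcases l with _ | ⟨a, t⟩
        · exact absurd rfl hne
        · simp at h ⊢; omega
      have : l.length - (n + 1) = 0 := by omega
      rw [this]
      simpa [List.intercalate] using iterate_dropSeg_nil n
    · rw [ih l.dropLast hdl (fun p hp => hnd p (List.dropLast_subset l hp))]
      congr 1
      rw [List.length_dropLast, List.dropLast_eq_take, List.take_take]
      congr 1
      omega

-- the while loop: dots stripped, counted
theorem dots_eq : ∀ (post : List Char) (lvl : Int),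
    update_path_dots lvl post =
      (lvl - ((post.takeWhile (· == '.')).length : Int), post.dropWhile (· == '.')) := by
  intro post
  induction post with
  | nil => intro lvl; simp [update_path_dots]
  | cons c rest ih =>
    intro lvl
    by_cases hc : c = '.'
    · subst hc
      rw [show update_path_dots lvl ('.' :: rest) = update_path_dots (lvl - 1) rest from by
        simp [update_path_dots]]
      rw [ih]
      simp only [List.takeWhile, List.dropWhile]
      simp only [Prod.mk.injEq]
      refine ⟨by simp; omega, by simp⟩
    · rw [show update_path_dots lvl (c :: rest) = (lvl, c :: rest) from by
        simp [update_path_dots, hc]]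
      simp only [List.takeWhile, List.dropWhile]
      have : (c == '.') = false := by simp [hc]
      simp [this]

-- foldl with a constant body is iteration
theorem foldl_const_iterate {α β : Type} (f : α → α) (l : List β) : ∀ (s : α),
    l.foldl (fun s _ => f s) s = f^[l.length] s := by
  induction l with
  | nil => intro s; simp
  | cons b t ih =>
    intro s
    rw [List.foldl_cons, ih, List.length_cons, Function.iterate_succ_apply]

theorem pyRange_length (d : Int) : (PySem.List.pyRange 1 d 1).length = (d - 1).toNat := by
  simp only [PySem.List.pyRange]
  rw [if_neg (by norm_num)]
  by_cases h : (1 : Int) < d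
  · rw [if_pos (by norm_num), if_pos h]
    simp
  · rw [if_pos (by norm_num), if_neg h]
    simp
    omega

theorem takeWhile_len_eq (post : List Char) :
    post.length - (post.dropWhile (· == '.')).length = (post.takeWhile (· == '.')).length := by
  have h := congrArg List.length (List.takeWhile_append_dropWhile (p := (· == '.')) (l := post))
  rw [List.length_append] at h
  omega

-- ===== VERDICT (by name: the statement is the Claim_ definition above) =====
theorem update_path_spec : Claim_equal_update_path := by
  intro config_path post_path _
  unfold Spec_update_path update_path update_path_alt
  rw [dots_eq]
  dsimp only
  rw [takeWhile_len_eq]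
  set post := post_path.toList.dropWhile (· == '.') with hpost
  set t := (post_path.toList.takeWhile (· == '.')).length with ht
  by_cases h0 : t = 0
  · simp [h0]
  · rw [if_neg (by omega : ¬ ((0 : Int) - (t : Int) = 0)), if_neg h0]
    have harg : update_path_dropSeg^[(-(0 - (t : Int)) - 1).toNat] config_path.toList =
        (if t > 1 then
          PySem.Chars.join ['.']
            (PySem.List.slice (PySem.Chars.splitOn config_path.toList ['.']) none (some (-(t : Int) + 1)))
        else config_path.toList) := by
      by_cases h1 : t = 1
      · simp [h1]
      · rw [if_pos (by omega)]
        have hk : (-(0 - (t : Int)) - 1).toNat = t - 1 := by omega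
        rw [hk]
        have hl := dsAux_nodot config_path.toList [] (by simp)
        have hj : ['.'].intercalate (dsAux config_path.toList []) = config_path.toList := by
          have := join_dsAux config_path.toList []
          simpa [PySem.Chars.join] using this
        conv_lhs => rw [← hj]
        rw [key_iterate (t - 1) (dsAux config_path.toList []) (dsAux_ne_nil _ _) hl]
        rw [splitOn_dot]
        rw [show (-(t : Int) + 1) = -(((t - 1 : Nat)) : Int) by omega]
        rw [slice_neg _ (t - 1) (by omega)]
        rfl
    rw [foldl_const_iterate, pyRange_length,
      show ((-(0 - (t : Int))) - 1).toNat = (-(0 - (t : Int)) - 1).toNat from rfl]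
    rw [harg]
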